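-- pv_equiv track=rewrite | github.com/tonghuikang/kickstart | template/e2.py | solve_old
-- ===== SOURCE A (Python) =====
-- def solve_old(srr, k):
--     # your solution here
--
--     abc = {x:i for i,x in enumerate("abcdefghijklmnopqrstuvwxyz")}
--
--     res = (srr*(k//len(srr) + 1))[:k]
--     assert len(res) == k
--     for i in range(1,len(srr)+1):
--         candidate = (srr[:i]*(k//i + 1))[:k]
--         assert len(candidate) == k
--         if candidate < res:
--             res = candidate
--     return res
-- ===== SOURCE B (Python) =====
-- def solve_old(srr, k):
--     # Lazily compare periodic repetitions of prefixes: by Fine-Wilf, two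
--     # prefix-periodic streams with periods i and best that agree on the first
--     # i+best characters agree everywhere, so each comparison needs at most
--     # min(k, i+best) character probes; the length-k answer is built only once.
--     L = len(srr)
--     best = 1
--     for i in range(2, L + 1):
--         lim = min(k, i + best)
--         j = 0
--         while j < lim and srr[j % i] == srr[j % best]:
--             j += 1
--         if j < lim and srr[j % i] < srr[j % best]:
--             best = i
--     return (srr[:best] * (k // best + 1))[:k]
-- ===== Notes on version B (the rewrite author's own statement) =====
-- stated objective: faster
-- what changed: Instead of materialising a length-k string for every prefix length and comparing whole strings (O(L*k)), B picks the best prefix by lazily comparing the two periodic character streams, which by the Fine-Wilf periodicity argument need agree only on the first i+best positions, and builds the length-k answer once at the end (O(L^2 + k)).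
import Mathlib
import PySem

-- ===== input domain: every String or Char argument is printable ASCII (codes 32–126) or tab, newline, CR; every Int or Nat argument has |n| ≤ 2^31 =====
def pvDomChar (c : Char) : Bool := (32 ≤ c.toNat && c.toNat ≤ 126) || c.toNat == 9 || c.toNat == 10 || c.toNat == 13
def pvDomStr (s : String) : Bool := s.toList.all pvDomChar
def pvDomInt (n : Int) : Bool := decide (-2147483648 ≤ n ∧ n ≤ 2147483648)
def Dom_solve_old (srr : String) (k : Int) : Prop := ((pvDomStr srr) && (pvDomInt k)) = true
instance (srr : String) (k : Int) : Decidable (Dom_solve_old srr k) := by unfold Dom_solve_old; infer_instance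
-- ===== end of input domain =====

-- B replaces A's per-prefix construction of a length-k string by a lazy
-- comparison of the two periodic character streams (cut off after i+best
-- positions by a Fine–Wilf periodicity argument) and builds the answer once.

-- ===== PORT A =====
-- loop body of A's 'for i in range(1, len(srr)+1)'
def aStep (s : List Char) (k : Int) (res : List Char) (i : Int) : List Char :=
  let candidate := PySem.List.slice
    (PySem.List.pyRepeat (PySem.List.slice s none (some i)) (PySem.Int.floordiv k i + 1))
    none (some k)
  if candidate < res then candidate else res

def solve_old (srr : String) (k : Int) : String :=
  -- abc = {x:i for i,x in enumerate("abc…z")} — dead code in A, kept for faithfulness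
  let _abc : PySem.Dict Char Int :=
    (PySem.List.enumerate "abcdefghijklmnopqrstuvwxyz".toList 0).foldl
      (fun d p => d.insert p.2 p.1) PySem.Dict.empty
  let s := srr.toList
  -- res = (srr*(k//len(srr) + 1))[:k]   (len(srr)=0 raises ZeroDivisionError: outside Pre_)
  let res := PySem.List.slice
    (PySem.List.pyRepeat s (PySem.Int.floordiv k (s.length : Int) + 1)) none (some k)
  -- 'assert len(res) == k' fails exactly when k < 0: outside Pre_
  let res := (PySem.List.pyRange 1 ((s.length : Int) + 1) 1).foldl (aStep s k) res
  String.ofList res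

-- ===== PORT B =====
-- the 'while j < lim and srr[j % i] == srr[j % best]: j += 1' loop of Source B;
-- fuel = lim - j, so 'j < lim' is 'fuel > 0'
def bScanB (s : List Char) (p q : Nat) : Nat → Nat → Nat
  | j, 0 => j
  | j, fuel+1 =>
    if s.getD (j % p) ' ' == s.getD (j % q) ' ' then bScanB s p q (j+1) fuel else j

-- loop body of Source B's 'for i in range(2, L+1)'
def bStep (s : List Char) (k : Int) (best : Nat) (i : Int) : Nat :=
  let p := i.toNat
  let lim := (min k ((p : Int) + (best : Int))).toNat
  let j := bScanB s p best 0 lim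
  if j < lim ∧ s.getD (j % p) ' ' < s.getD (j % best) ' ' then p else best

def solve_old_alt (srr : String) (k : Int) : String :=
  let s := srr.toList
  let best := (PySem.List.pyRange 2 ((s.length : Int) + 1) 1).foldl (bStep s k) 1
  String.ofList (PySem.List.slice
    (PySem.List.pyRepeat (s.take best) (PySem.Int.floordiv k (best : Int) + 1)) none (some k))

-- ===== PRECONDITION & SPEC =====
-- A raises ZeroDivisionError on srr = "" and AssertionError on k < 0; excluded.
def Pre_solve_old (srr : String) (k : Int) : Prop := srr.toList ≠ [] ∧ 0 ≤ k
instance (srr : String) (k : Int) : Decidable (Pre_solve_old srr k) := by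
  unfold Pre_solve_old; infer_instance
def pvWitness_solve_old : String × Int := ("ba", 3)

def Spec_solve_old (srr : String) (k : Int) (out : String) : Prop := out = solve_old_alt srr k
instance (srr : String) (k : Int) (out : String) : Decidable (Spec_solve_old srr k out) := by
  unfold Spec_solve_old; infer_instance

-- ===== CLAIM (what is proved, stated in full; the proofs are below) =====
def Claim_equal_solve_old : Prop := ∀ (srr : String) (k : Int),
  Dom_solve_old srr k → Pre_solve_old srr k → Spec_solve_old srr k (solve_old srr k)

-- ===== LEMMAS AND PROOFS =====

-- the j-th character of the infinite repetition of s's length-p prefix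
def fseq (s : List Char) (p j : ℕ) : Char := s.getD (j % p) ' '
-- the first K characters of that repetition
def candL (s : List Char) (p K : ℕ) : List Char := (List.range K).map (fseq s p)

lemma rep_getElem (t : List Char) :
    ∀ (m j : ℕ) (h : j < ((List.replicate m t).flatten).length),
      ((List.replicate m t).flatten)[j] = t.getD (j % t.length) ' ' := by
  intro m
  induction m with
  | zero => intro j h; simp at h
  | succ m ih =>
    intro j h
    simp only [List.replicate_succ, List.flatten_cons]
    by_cases hj : j < t.length
    · rw [List.getElem_append_left hj, Nat.mod_eq_of_lt hj, List.getD_eq_getElem t ' ' hj]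
    · push_neg at hj
      have h' : j - t.length < ((List.replicate m t).flatten).length := by
        simp only [List.replicate_succ, List.flatten_cons, List.length_append] at h; omega
      rw [List.getElem_append_right hj, ih (j - t.length) h', Nat.mod_eq_sub_mod hj]

lemma candExpr_eq (s : List Char) (k : ℤ) (hk : 0 ≤ k) (p : ℕ) (hp : 0 < p)
    (hpn : p ≤ s.length) :
    PySem.List.slice (PySem.List.pyRepeat (s.take p) (PySem.Int.floordiv k (p : ℤ) + 1))
      none (some k) = candL s p k.toNat := by
  have hp' : (0:ℤ) < (p:ℤ) := by exact_mod_cast hp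
  rw [PySem.List.slice_to _ hk]
  unfold PySem.List.pyRepeat
  have hlen : (s.take p).length = p := by simp; omega
  set m := (PySem.Int.floordiv k (p:ℤ) + 1).toNat with hm
  have hflatlen : ((List.replicate m (s.take p)).flatten).length = m * p := by
    simp [List.length_flatten, hlen, List.sum_replicate, smul_eq_mul]
  have hKm : k.toNat ≤ m * p := by
    have h1 : k < (k / (p:ℤ) + 1) * (p:ℤ) := Int.lt_ediv_add_one_mul_self k hp'
    have h2 : 0 ≤ k / (p:ℤ) := Int.ediv_nonneg hk (le_of_lt hp')
    have h3 : ((m * p : ℕ) : ℤ) = (k / (p:ℤ) + 1) * (p:ℤ) := by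
      rw [hm, PySem.Int.floordiv_eq_ediv_of_pos hp']
      push_cast [Int.toNat_of_nonneg (by omega : (0:ℤ) ≤ k / (p:ℤ) + 1)]
      ring
    omega
  apply List.ext_getElem
  · simp [candL, hflatlen]; omega
  · intro j h1 h2
    have hj : j < k.toNat := by simpa [candL] using h2
    have hjf : j < ((List.replicate m (s.take p)).flatten).length := by omega
    rw [List.getElem_take, rep_getElem _ m j hjf]
    have hmod : j % p < p := Nat.mod_lt _ hp
    simp only [candL, List.getElem_map, List.getElem_range, fseq]
    rw [hlen, List.getD_eq_getElem _ ' ' (by omega : j % p < (s.take p).length),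
      List.getElem_take, List.getD_eq_getElem s ' ' (by omega : j % p < s.length)]

-- lexicographic '<' of two equal-length character tables, by first difference
lemma lt_map_range_iff (F G : ℕ → Char) : ∀ (K : ℕ),
    ((List.range K).map F < (List.range K).map G ↔
      ∃ j, j < K ∧ (∀ t, t < j → F t = G t) ∧ F j < G j) := by
  intro K
  induction K generalizing F G with
  | zero => simp
  | succ K ih =>
    rw [List.range_succ_eq_map, List.map_cons, List.map_cons, List.map_map, List.map_map,
      List.cons_lt_cons_iff, ih (F ∘ Nat.succ) (G ∘ Nat.succ)]
    constructor
    · rintro (h | ⟨h0, j, hj, hpre, hlt⟩)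
      · exact ⟨0, by omega, fun t ht => absurd ht (by omega), h⟩
      · refine ⟨j + 1, by omega, fun t ht => ?_, hlt⟩
        match t with
        | 0 => exact h0
        | t+1 => exact hpre t (by omega)
    · rintro ⟨j, hj, hpre, hlt⟩
      match j with
      | 0 => exact Or.inl hlt
      | j+1 =>
        exact Or.inr ⟨hpre 0 (by omega), j, by omega,
          fun t ht => hpre (t+1) (by omega), hlt⟩

-- Fine–Wilf-style: two globally periodic streams agreeing on the first p+q
-- positions agree everywhere
lemma fw (p q : ℕ) (hp : 0 < p) (hq : 0 < q) (F G : ℕ → Char)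
    (hF : ∀ j, F (j + p) = F j) (hG : ∀ j, G (j + q) = G j)
    (h : ∀ j, j < p + q → F j = G j) : ∀ j, F j = G j := by
  intro j
  induction j using Nat.strong_induction_on with
  | _ j ih =>
    by_cases hj : j < p + q
    · exact h j hj
    · push_neg at hj
      calc F j = F (j - p) := by rw [← hF (j - p)]; congr 1; omega
        _ = G (j - p) := ih _ (by omega)
        _ = G (j - p - q) := by rw [← hG (j - p - q)]; congr 1; omega
        _ = F (j - p - q) := (ih _ (by omega)).symm
        _ = F (j - q) := by rw [show j - q = (j - q - p) + p by omega, hF]; congr 1; omega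
        _ = G (j - q) := ih _ (by omega)
        _ = G j := by rw [← hG (j - q)]; congr 1; omega

lemma bScanB_spec (s : List Char) (p q : ℕ) : ∀ (fuel j : ℕ),
    j ≤ bScanB s p q j fuel ∧ bScanB s p q j fuel ≤ j + fuel ∧
    (∀ t, j ≤ t → t < bScanB s p q j fuel → fseq s p t = fseq s q t) ∧
    (bScanB s p q j fuel < j + fuel →
      fseq s p (bScanB s p q j fuel) ≠ fseq s q (bScanB s p q j fuel)) := by
  intro fuel
  induction fuel with
  | zero => intro j; refine ⟨le_rfl, by simp [bScanB], fun t h1 h2 => ?_, by simp [bScanB]⟩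
            · simp [bScanB] at h2; omega
  | succ fl ih =>
    intro j
    by_cases h : s.getD (j % p) ' ' == s.getD (j % q) ' '
    · have heq : fseq s p j = fseq s q j := by
        simpa [fseq] using h
      have hb : bScanB s p q j (fl+1) = bScanB s p q (j+1) fl := by
        simp only [bScanB]; rw [if_pos h]
      obtain ⟨i1, i2, i3, i4⟩ := ih (j+1)
      rw [hb]
      refine ⟨by omega, by omega, fun t h1 h2 => ?_, fun hlt => i4 (by omega)⟩
      rcases Nat.eq_or_lt_of_le h1 with rfl | hgt
      · exact heq
      · exact i3 t hgt h2
    · have hb : bScanB s p q j (fl+1) = j := by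
        simp only [bScanB]; rw [if_neg h]
      rw [hb]
      refine ⟨le_rfl, by omega, fun t h1 h2 => by omega, fun _ => ?_⟩
      simpa [fseq] using h

-- the decision B's lazy scan takes is exactly 'candidate < current best'
lemma decide_lt (s : List Char) (k : ℤ) (hk : 0 ≤ k) (p q : ℕ)
    (hp : 0 < p) (hpn : p ≤ s.length) (hq : 0 < q) (hqn : q ≤ s.length) :
    (candL s p k.toNat < candL s q k.toNat ↔
      (bScanB s p q 0 (min k.toNat (p+q)) < min k.toNat (p+q) ∧
       s.getD ((bScanB s p q 0 (min k.toNat (p+q))) % p) ' ' <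
       s.getD ((bScanB s p q 0 (min k.toNat (p+q))) % q) ' ')) := by
  set lim := min k.toNat (p+q) with hlim
  set r := bScanB s p q 0 lim with hr
  obtain ⟨s1, s2, s3, s4⟩ := bScanB_spec s p q lim 0
  rw [← hr] at s1 s2 s3 s4
  show candL s p k.toNat < candL s q k.toNat ↔ (r < lim ∧ fseq s p r < fseq s q r)
  unfold candL
  rw [lt_map_range_iff]
  constructor
  · rintro ⟨j, hj, hpre, hlt⟩
    by_cases hrl : r < lim
    · rcases Nat.lt_trichotomy j r with hlt' | rfl | hgt
      · exact absurd (s3 j (by omega) hlt') (ne_of_lt hlt)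
      · exact ⟨hrl, hlt⟩
      · exact absurd (hpre r hgt) (s4 (by omega))
    · -- no difference below lim
      have hall : ∀ t, t < lim → fseq s p t = fseq s q t := fun t ht => s3 t (by omega) (by omega)
      by_cases hK : k.toNat ≤ p + q
      · exact absurd (hall j (by omega)) (ne_of_lt hlt)
      · have : ∀ t, fseq s p t = fseq s q t := by
          apply fw p q hp hq _ _ (fun t => by simp [fseq, Nat.add_mod_right])
            (fun t => by simp [fseq, Nat.add_mod_right])
          intro t ht; exact hall t (by omega)
        exact absurd (this j) (ne_of_lt hlt)
  · rintro ⟨hrl, hlt⟩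
    exact ⟨r, by omega, fun t ht => s3 t (by omega) ht, hlt⟩

-- B's loop body decides exactly 'candidate of i < candidate of best'
lemma bStep_eq (s : List Char) (k : ℤ) (hk : 0 ≤ k) (b : ℕ) (hb1 : 0 < b) (hb2 : b ≤ s.length)
    (i : ℤ) (hi1 : 1 ≤ i) (hi2 : i ≤ (s.length : ℤ)) :
    bStep s k b i =
      (if candL s i.toNat k.toNat < candL s b k.toNat then i.toNat else b) := by
  unfold bStep
  dsimp only
  have hlimeq : (min k ((i.toNat : ℤ) + (b : ℤ))).toNat = min k.toNat (i.toNat + b) := by omega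
  rw [hlimeq]
  have hd := decide_lt s k hk i.toNat b (by omega) (by omega) hb1 hb2
  by_cases hlt : candL s i.toNat k.toNat < candL s b k.toNat
  · rw [if_pos (hd.mp hlt), if_pos hlt]
  · rw [if_neg (fun hc => hlt (hd.mpr hc)), if_neg hlt]

-- A's loop body on range members, in candidate form
lemma aStep_eq (s : List Char) (k : ℤ) (hk : 0 ≤ k) (r : List Char)
    (i : ℤ) (hi1 : 1 ≤ i) (hi2 : i ≤ (s.length : ℤ)) :
    aStep s k r i =
      (if candL s i.toNat k.toNat < r then candL s i.toNat k.toNat else r) := by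
  unfold aStep
  dsimp only
  have h2 : i = ((i.toNat : ℕ) : ℤ) := by omega
  rw [h2, PySem.List.slice_to s (by omega)]
  simp only [Int.toNat_natCast]
  rw [candExpr_eq s k hk i.toNat (by omega) (by omega)]

-- A's running-minimum loop: the result is one of the candidates (or the seed)
-- and is a lower bound of all of them
lemma foldA (v : ℤ → List Char) : ∀ (l : List ℤ) (r : List Char),
    (l.foldl (fun r i => if v i < r then v i else r) r = r ∨
      ∃ i ∈ l, l.foldl (fun r i => if v i < r then v i else r) r = v i) ∧
    l.foldl (fun r i => if v i < r then v i else r) r ≤ r ∧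
    ∀ i ∈ l, l.foldl (fun r i => if v i < r then v i else r) r ≤ v i := by
  intro l
  induction l with
  | nil => intro r; simp
  | cons a tl ih =>
    intro r
    simp only [List.foldl_cons]
    obtain ⟨m1, m2, m3⟩ := ih (if v a < r then v a else r)
    have hle : (if v a < r then v a else r) ≤ r := by
      split_ifs with h; exact le_of_lt h; exact le_rfl
    have hlea : (if v a < r then v a else r) ≤ v a := by
      split_ifs with h; exact le_rfl; exact not_lt.mp h
    refine ⟨?_, le_trans m2 hle, ?_⟩
    · rcases m1 with h | ⟨i, hi, h⟩
      · rw [h]; split_ifs with h'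
        · exact Or.inr ⟨a, List.mem_cons_self, rfl⟩
        · exact Or.inl rfl
      · exact Or.inr ⟨i, List.mem_cons_of_mem _ hi, h⟩
    · intro i hi
      rcases List.mem_cons.mp hi with rfl | hi'
      · exact le_trans m2 hlea
      · exact m3 i hi'

-- B's loop: the chosen prefix length stays in [1, n], its candidate only
-- improves, and it is a lower bound of all candidates seen
lemma foldB (s : List Char) (k : ℤ) (hk : 0 ≤ k) :
    ∀ (l : List ℤ), (∀ i ∈ l, 1 ≤ i ∧ i ≤ (s.length : ℤ)) →
    ∀ (b : ℕ), 0 < b → b ≤ s.length →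
    (0 < l.foldl (bStep s k) b ∧ l.foldl (bStep s k) b ≤ s.length ∧
     candL s (l.foldl (bStep s k) b) k.toNat ≤ candL s b k.toNat ∧
     ∀ i ∈ l, candL s (l.foldl (bStep s k) b) k.toNat ≤ candL s i.toNat k.toNat) := by
  intro l
  induction l with
  | nil => intro _ b hb1 hb2; simpa using ⟨hb1, hb2⟩
  | cons a tl ih =>
    intro hmem b hb1 hb2
    have ha := hmem a List.mem_cons_self
    simp only [List.foldl_cons]
    rw [bStep_eq s k hk b hb1 hb2 a ha.1 ha.2]
    by_cases hlt : candL s a.toNat k.toNat < candL s b k.toNat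
    · rw [if_pos hlt]
      obtain ⟨m1, m2, m3, m4⟩ := ih (fun i hi => hmem i (List.mem_cons_of_mem _ hi))
        a.toNat (by omega) (by omega)
      refine ⟨m1, m2, le_trans m3 (le_of_lt hlt), fun i hi => ?_⟩
      rcases List.mem_cons.mp hi with rfl | hi'
      · exact m3
      · exact m4 i hi'
    · rw [if_neg hlt]
      obtain ⟨m1, m2, m3, m4⟩ := ih (fun i hi => hmem i (List.mem_cons_of_mem _ hi)) b hb1 hb2
      refine ⟨m1, m2, m3, fun i hi => ?_⟩
      rcases List.mem_cons.mp hi with rfl | hi'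
      · exact le_trans m3 (not_lt.mp hlt)
      · exact m4 i hi'

-- ===== VERDICT (by name: the statement is the Claim_ definition above) =====
theorem solve_old_spec : Claim_equal_solve_old := by
  intro srr k _ hpre
  obtain ⟨hs, hk⟩ := hpre
  unfold Spec_solve_old solve_old solve_old_alt
  dsimp only
  set s := srr.toList with hsdef
  have hn : 0 < s.length := List.length_pos_iff.mpr hs
  -- A's seed is the full-string candidate
  have hseed := candExpr_eq s k hk s.length hn le_rfl
  rw [List.take_length] at hseed
  -- A's loop in candidate form
  have hbody : ∀ (r : List Char) (i : ℤ), i ∈ PySem.List.pyRange 1 ((s.length : Int) + 1) 1 →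
      aStep s k r i =
      (fun r (i : ℤ) => if candL s i.toNat k.toNat < r then candL s i.toNat k.toNat else r) r i := by
    intro r i hi
    rw [PySem.List.mem_pyRange_one] at hi
    exact aStep_eq s k hk r i hi.1 (by omega)
  rw [hseed, PySem.List.foldl_congr_mem _ _ _ _ hbody]
  obtain ⟨a1, a2, a3⟩ := foldA (fun i => candL s i.toNat k.toNat)
    (PySem.List.pyRange 1 ((s.length : Int) + 1) 1) (candL s s.length k.toNat)
  set rA := (PySem.List.pyRange 1 ((s.length : Int) + 1) 1).foldl
    (fun r (i : ℤ) => if candL s i.toNat k.toNat < r then candL s i.toNat k.toNat else r)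
    (candL s s.length k.toNat) with hrA
  have hmemB : ∀ i ∈ PySem.List.pyRange 2 ((s.length : Int) + 1) 1,
      1 ≤ i ∧ i ≤ (s.length : ℤ) := by
    intro i hi; rw [PySem.List.mem_pyRange_one] at hi; omega
  obtain ⟨b1, b2, b3, b4⟩ := foldB s k hk
    (PySem.List.pyRange 2 ((s.length : Int) + 1) 1) hmemB 1 one_pos hn
  set bB := (PySem.List.pyRange 2 ((s.length : Int) + 1) 1).foldl (bStep s k) 1 with hbB
  -- B's candidate is below every candidate with index in [1, n]
  have hBle : ∀ m : ℕ, 1 ≤ m → m ≤ s.length → candL s bB k.toNat ≤ candL s m k.toNat := by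
    intro m hm1 hm2
    by_cases hm : m = 1
    · rw [hm]; exact b3
    · have hmm : ((m : ℤ)) ∈ PySem.List.pyRange 2 ((s.length : Int) + 1) 1 := by
        rw [PySem.List.mem_pyRange_one]; omega
      simpa using b4 _ hmm
  -- A's result is below B's candidate
  have hAle : rA ≤ candL s bB k.toNat := by
    have hmm : ((bB : ℤ)) ∈ PySem.List.pyRange 1 ((s.length : Int) + 1) 1 := by
      rw [PySem.List.mem_pyRange_one]; omega
    simpa using a3 _ hmm
  -- B's candidate is below A's result
  have hBleA : candL s bB k.toNat ≤ rA := by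
    rcases a1 with h | ⟨i, hi, h⟩
    · rw [h]; exact hBle s.length hn le_rfl
    · rw [PySem.List.mem_pyRange_one] at hi
      rw [h]; exact hBle i.toNat (by omega) (by omega)
  rw [le_antisymm hAle hBleA, candExpr_eq s k hk bB b1 b2]
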